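-- pv_equiv track=rewrite | github.com/LionelYao/Data_structures_and_algorithm_in_python | C-1.14.py | distinct_product
-- ===== SOURCE A (Python) =====
-- def distinct_product(nums):
--     length = len(nums)
--     found = 0
--     for i in range(length):
--         for j in range(i+1,length):
--             if (nums[i] * nums[j]) % 2 == 1:
--                 if not found:
--                     found = 1
--                 else:
--                     return False
--     if found:
--         return True
--     return False
-- ===== SOURCE B (Python) =====
-- def distinct_product(nums):
--     odd = 0
--     for x in nums:
--         if x % 2 == 1:
--             odd += 1
--             if odd == 3:
--                 return False
--     return odd == 2
-- ===== Notes on version B (the rewrite author's own statement) =====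
-- stated objective: simpler
-- what changed: Replaced the nested scan over all pairs (with a 'found' flag and early exit) by a single pass that counts odd elements (stopping at the third) and returns count == 2, since a pair has an odd product iff both elements are odd, so exactly one such pair exists iff exactly two elements are odd.
import Mathlib
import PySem

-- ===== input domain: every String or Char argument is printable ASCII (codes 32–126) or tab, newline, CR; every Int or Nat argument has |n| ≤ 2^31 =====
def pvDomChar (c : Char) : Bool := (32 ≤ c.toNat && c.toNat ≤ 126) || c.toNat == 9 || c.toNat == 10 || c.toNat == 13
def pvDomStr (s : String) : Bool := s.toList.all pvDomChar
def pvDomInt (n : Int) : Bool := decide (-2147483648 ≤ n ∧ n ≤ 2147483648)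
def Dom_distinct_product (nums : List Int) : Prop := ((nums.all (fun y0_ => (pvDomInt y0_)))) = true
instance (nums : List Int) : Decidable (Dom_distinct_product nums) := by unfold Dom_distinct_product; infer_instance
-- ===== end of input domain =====

-- ===== PORT A =====
-- B replaces A's scan over all pairs by a single pass that counts odd elements (exactly one odd-product pair exists iff exactly two elements are odd); objective: simpler.
-- inner loop: 'for j in range(i+1,length)' with early 'return False' encoded as Option (none = early False).
-- nums.getD i 0 is exact here: dpInner/dpOuter only read indices < nums.length.
def dpInner (nums : List Int) (i j : Nat) (found : Int) : Option Int :=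
  if j < nums.length then
    if PySem.Int.mod ((nums.getD i 0) * (nums.getD j 0)) 2 = 1 then
      if found = 0 then dpInner nums i (j + 1) 1
      else none
    else dpInner nums i (j + 1) found
  else some found
termination_by nums.length - j

-- outer loop: 'for i in range(length)'
def dpOuter (nums : List Int) (i : Nat) (found : Int) : Option Int :=
  if i < nums.length then
    match dpInner nums i (i + 1) found with
    | none => none
    | some f => dpOuter nums (i + 1) f
  else some found
termination_by nums.length - i

def distinct_product (nums : List Int) : Bool :=
  match dpOuter nums 0 0 with
  | none => false
  | some f => decide (f ≠ 0)

-- ===== PORT B =====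
-- one pass over the list; 'return False' on the third odd element encoded as the false branch
def dpCount (l : List Int) (odd : Int) : Bool :=
  match l with
  | [] => decide (odd = 2)
  | x :: t =>
    if PySem.Int.mod x 2 = 1 then
      if odd + 1 = 3 then false else dpCount t (odd + 1)
    else dpCount t odd

def distinct_product_alt (nums : List Int) : Bool :=
  dpCount nums 0

-- ===== PRECONDITION & SPEC =====
def Spec_distinct_product (nums : List Int) (out : Bool) : Prop := out = distinct_product_alt nums
instance (nums : List Int) (out : Bool) : Decidable (Spec_distinct_product nums out) := by unfold Spec_distinct_product; infer_instance

-- ===== CLAIM (what is proved, stated in full; the proofs are below) =====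
def Claim_equal_distinct_product : Prop := ∀ (nums : List Int), Dom_distinct_product nums → Spec_distinct_product nums (distinct_product nums)

-- ===== LEMMAS AND PROOFS =====
theorem pymod2 (a : Int) : PySem.Int.mod a 2 = a % 2 :=
  PySem.Int.mod_eq_emod_of_pos (by norm_num)

def oddCnt (l : List Int) : Nat := l.countP (fun x => decide (x % 2 = 1))

theorem mod_mul_two (x y : Int) :
    x * y % 2 = 1 ↔ (x % 2 = 1 ∧ y % 2 = 1) := by
  rw [Int.mul_emod]
  rcases Int.emod_two_eq x with hx | hx <;> rcases Int.emod_two_eq y with hy | hy <;>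
    simp [hx, hy]

theorem oddCnt_drop (nums : List Int) (j : Nat) (hj : j < nums.length) :
    oddCnt (nums.drop j) =
      (if nums.getD j 0 % 2 = 1 then 1 else 0) + oddCnt (nums.drop (j + 1)) := by
  have hg : nums.getD j 0 = nums[j] := by
    simp [List.getD_eq_getElem?_getD, List.getElem?_eq_getElem hj]
  rw [List.drop_eq_getElem_cons hj, hg]
  simp only [oddCnt, List.countP_cons]
  by_cases h : nums[j] % 2 = 1
  · simp [h]
    omega
  · simp [h]

theorem dpInner_eq (nums : List Int) (i j : Nat) (f : Int) (hf : f = 0 ∨ f = 1) :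
    dpInner nums i j f =
      (if 2 ≤ f.toNat + (if nums.getD i 0 % 2 = 1 then oddCnt (nums.drop j) else 0)
       then none
       else some (f + (if nums.getD i 0 % 2 = 1 then oddCnt (nums.drop j) else 0))) := by
  generalize hn : nums.length - j = n
  induction n generalizing j f with
  | zero =>
    rw [dpInner]
    have hj : ¬ j < nums.length := by omega
    have hd : nums.drop j = [] := List.drop_eq_nil_of_le (by omega)
    have hft : f.toNat ≤ 1 := by rcases hf with h | h <;> simp [h]
    have hz : oddCnt ([] : List Int) = 0 := rfl
    simp only [hj, if_false, hd, hz]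
    split_ifs <;> first | rfl | (exfalso; omega) | simp
  | succ n ih =>
    have hj : j < nums.length := by omega
    rw [dpInner]
    simp only [pymod2, hj, if_true]
    have hdrop := oddCnt_drop nums j hj
    by_cases hp : nums.getD i 0 * nums.getD j 0 % 2 = 1
    · rcases (mod_mul_two _ _).mp hp with ⟨hxi, hxj⟩
      simp only [hp, if_true]
      rcases hf with hf0 | hf1
      · subst hf0
        rw [ih (j + 1) 1 (Or.inr rfl) (by omega)]
        rw [hdrop]
        simp only [hxi, if_true, hxj]
        split_ifs <;>
          first
            | rfl
            | (exfalso; omega)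
            | (simp only [Option.some.injEq]; push_cast; ring)
      · subst hf1
        simp only [(by norm_num : ¬ (1:Int) = 0), if_false]
        rw [hdrop]
        simp only [hxi, if_true, hxj]
        have h2 : 2 ≤ (1:Int).toNat + (1 + oddCnt (nums.drop (j + 1))) := by
          simp only [Int.toNat_one]; omega
        rw [if_pos h2]
    · simp only [hp, if_false]
      rw [ih (j + 1) f hf (by omega)]
      by_cases hxi : nums.getD i 0 % 2 = 1
      · have hxj : ¬ nums.getD j 0 % 2 = 1 := fun hxj => hp ((mod_mul_two _ _).mpr ⟨hxi, hxj⟩)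
        rw [hdrop]
        simp only [hxi, if_true, hxj, if_false, Nat.zero_add]
      · simp only [hxi, if_false]

theorem dpOuter_eq (nums : List Int) (i : Nat) (f : Int) (hf : f = 0 ∨ f = 1) :
    dpOuter nums i f =
      (if 2 ≤ f.toNat + Nat.choose (oddCnt (nums.drop i)) 2
       then none
       else some (f + Nat.choose (oddCnt (nums.drop i)) 2)) := by
  generalize hn : nums.length - i = n
  induction n generalizing i f with
  | zero =>
    rw [dpOuter]
    have hi : ¬ i < nums.length := by omega
    have hd : nums.drop i = [] := List.drop_eq_nil_of_le (by omega)
    have hft : f.toNat ≤ 1 := by rcases hf with h | h <;> simp [h]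
    have hz : oddCnt ([] : List Int) = 0 := rfl
    simp only [hi, if_false, hd, hz, Nat.choose_zero_succ]
    split_ifs <;> first | rfl | (exfalso; omega) | simp
  | succ n ih =>
    have hi : i < nums.length := by omega
    rw [dpOuter]
    simp only [hi, if_true]
    rw [dpInner_eq nums i (i + 1) f hf]
    have hdrop := oddCnt_drop nums i hi
    set c := oddCnt (nums.drop (i + 1)) with hc
    by_cases hxi : nums.getD i 0 % 2 = 1
    · have hch : Nat.choose (oddCnt (nums.drop i)) 2 = c + Nat.choose c 2 := by
        rw [hdrop, if_pos hxi,
            show 1 + c = c + 1 by omega, Nat.choose_succ_succ, Nat.choose_one_right]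
      simp only [hxi, if_true]
      by_cases h2 : 2 ≤ f.toNat + c
      · have h2' : 2 ≤ f.toNat + Nat.choose (oddCnt (nums.drop i)) 2 := by
          rw [hch]
          have := Nat.zero_le (Nat.choose c 2)
          omega
        rw [if_pos h2, if_pos h2']
      · rw [if_neg h2]
        show dpOuter nums (i + 1) (f + (c : Int)) = _
        have hf' : f + (c : Int) = 0 ∨ f + (c : Int) = 1 := by
          rcases hf with h | h <;> subst h <;> omega
        rw [ih (i + 1) (f + (c : Int)) hf' (by omega)]
        have ht : (f + (c : Int)).toNat = f.toNat + c := by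
          rcases hf with h | h <;> subst h <;> omega
        rw [ht, hch]
        simp only [← hc]
        split_ifs <;>
          first
            | rfl
            | (exfalso; omega)
            | (simp only [Option.some.injEq]; push_cast; ring)
    · have hk : oddCnt (nums.drop i) = c := by rw [hdrop, if_neg hxi]; omega
      simp only [hxi, if_false, Nat.cast_zero, add_zero]
      have hft : ¬ 2 ≤ f.toNat := by rcases hf with h | h <;> subst h <;> simp
      rw [if_neg hft]
      show dpOuter nums (i + 1) f = _
      rw [ih (i + 1) f hf (by omega), hk]

theorem dpCount_eq (l : List Int) (odd : Int) (h0 : 0 ≤ odd) (h2 : odd ≤ 2) :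
    dpCount l odd = decide (odd + (oddCnt l : Int) = 2) := by
  induction l generalizing odd with
  | nil =>
    simp [dpCount, oddCnt]
  | cons x t ih =>
    rw [dpCount, pymod2]
    have hcnt : oddCnt (x :: t) = (if x % 2 = 1 then 1 else 0) + oddCnt t := by
      simp only [oddCnt, List.countP_cons]
      by_cases h : x % 2 = 1 <;> simp [h] <;> omega
    by_cases h : x % 2 = 1
    · simp only [h, if_true] at hcnt ⊢
      by_cases h3 : odd + 1 = 3
      · rw [if_pos h3, hcnt]
        have hne : ¬ (odd + (((1 + oddCnt t : Nat) : Int)) = 2) := by push_cast; omega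
        simp only [hne, decide_false]
      · rw [if_neg h3, ih (odd + 1) (by omega) (by omega), hcnt]
        rw [decide_eq_decide]
        push_cast
        omega
    · simp only [h, if_false] at hcnt ⊢
      rw [ih odd h0 h2, hcnt]
      rw [decide_eq_decide]
      push_cast
      omega

theorem choose_two_eq_one_iff (k : Nat) : Nat.choose k 2 = 1 ↔ k = 2 := by
  match k with
  | 0 => simp
  | 1 => simp
  | 2 => simp
  | (m + 3) =>
    have h : Nat.choose 3 2 ≤ Nat.choose (m + 3) 2 := Nat.choose_le_choose 2 (by omega)
    simp only [show Nat.choose 3 2 = 3 from rfl] at h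
    constructor
    · intro hh; omega
    · intro hh; omega

theorem choose_two_ge_two (k : Nat) (h : 2 ≤ Nat.choose k 2) : k ≠ 2 := by
  intro hk
  subst hk
  simp at h

-- ===== VERDICT =====
theorem distinct_product_spec : Claim_equal_distinct_product := by
  intro nums _
  unfold Spec_distinct_product distinct_product distinct_product_alt
  rw [dpOuter_eq nums 0 0 (Or.inl rfl), dpCount_eq nums 0 (by omega) (by omega)]
  simp only [List.drop_zero, Int.toNat_zero, zero_add]
  generalize oddCnt nums = k
  by_cases h2 : 2 ≤ Nat.choose k 2
  · have hne : k ≠ 2 := choose_two_ge_two k h2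
    rw [if_pos h2]
    show false = decide ((k : Int) = 2)
    have hne' : ¬ ((k : Int) = 2) := by omega
    simp [hne']
  · rw [if_neg h2]
    show decide (¬ ((Nat.choose k 2 : Int) = 0)) = decide ((k : Int) = 2)
    by_cases he : k = 2
    · subst he
      decide
    · have h1 : Nat.choose k 2 ≠ 1 := fun hh => he ((choose_two_eq_one_iff k).mp hh)
      have h0 : Nat.choose k 2 = 0 := by omega
      have hne' : ¬ ((k : Int) = 2) := by omega
      simp [h0, hne']
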